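-- pv_equiv track=rewrite | github.com/zhoho/PS | 프로그래머스/0/120853. 컨트롤 제트/컨트롤 제트.py | solution
-- ===== SOURCE A (Python) =====
-- def solution(s):
--     s = s.split()
--     answer = []
--     for i in range(len(s)):
--         if(s[i] == 'Z'):
--             answer.append(0)
--             answer[i - 1] = 0
--         else:
--             answer.append(int(s[i]))
--     return sum(answer)
-- ===== SOURCE B (Python) =====
-- def solution(s):
--     tokens = s.split()
--     total = 0
--     n = len(tokens)
--     for i, tok in enumerate(tokens):
--         if tok == 'Z':
--             continue
--         v = int(tok)  # evaluated even when cancelled, as A does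
--         if i + 1 == n or tokens[i + 1] != 'Z':
--             total += v
--     return total
-- ===== Notes on version B (the rewrite author's own statement) =====
-- stated objective: simpler
-- what changed: B keeps a single running total with a one-token lookahead (a number counts unless the next token is 'Z') instead of A's materialised list with backwards index-zeroing and a final sum.
import Mathlib
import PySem

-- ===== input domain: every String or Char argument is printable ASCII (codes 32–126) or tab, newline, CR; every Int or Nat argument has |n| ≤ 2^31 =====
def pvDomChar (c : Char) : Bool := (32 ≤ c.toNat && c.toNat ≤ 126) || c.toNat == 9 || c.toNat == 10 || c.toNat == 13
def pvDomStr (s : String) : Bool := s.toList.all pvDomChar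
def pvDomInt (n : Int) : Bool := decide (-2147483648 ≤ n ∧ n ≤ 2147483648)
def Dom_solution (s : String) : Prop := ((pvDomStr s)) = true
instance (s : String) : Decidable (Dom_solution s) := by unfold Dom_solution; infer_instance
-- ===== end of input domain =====

-- B replaces A's materialised answer list (with its backwards index-zeroing and final sum)
-- by a single running total with a one-token lookahead; return values proved equal on Pre_.

-- ===== PORT A =====
def solution (s : String) : Int :=
  let toks := PySem.Str.split₀ s
  let answer := (PySem.List.pyRange 0 (toks.length : Int) 1).foldl
    (fun ans i =>
      if PySem.List.pyGetD toks i "" = "Z" then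
        PySem.List.pySetD (ans ++ [(0 : Int)]) (i - 1) 0
      else
        ans ++ [(PySem.Int.ofStr? (PySem.List.pyGetD toks i "")).getD 0]) []
  answer.sum

-- ===== PORT B =====
def solution_alt (s : String) : Int :=
  let tokens := PySem.Str.split₀ s
  let n := tokens.length
  (PySem.List.enumerate tokens).foldl
    (fun total p =>
      if p.2 = "Z" then total
      else
        let v := (PySem.Int.ofStr? p.2).getD 0   -- int(tok); ValueError excluded by Pre_
        if p.1 + 1 = (n : Int) ∨ PySem.List.pyGetD tokens (p.1 + 1) "" ≠ "Z" then total + v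
        else total) 0

-- ===== PRECONDITION & SPEC =====
-- Pre_ excludes exactly the inputs where some whitespace-token is neither 'Z' nor a valid
-- int literal: there both A and B raise ValueError from int().
def Pre_solution (s : String) : Prop :=
  ∀ t ∈ PySem.Str.split₀ s, t = "Z" ∨ (PySem.Int.ofStr? t).isSome = true
instance (s : String) : Decidable (Pre_solution s) := by unfold Pre_solution; infer_instance
def pvWitness_solution : String := "1 2 Z 3"

def Spec_solution (s : String) (out : Int) : Prop := out = solution_alt s
instance (s : String) (out : Int) : Decidable (Spec_solution s out) := by unfold Spec_solution; infer_instance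

-- ===== CLAIM (what is proved, stated in full; the proofs are below) =====
def Claim_equal_solution : Prop := ∀ (s : String), Dom_solution s → Pre_solution s → Spec_solution s (solution s)

-- ===== LEMMAS AND PROOFS =====

-- value of A's answer[j] once the first n tokens have been processed
def pvCell (toks : List String) (n j : Nat) : Int :=
  if toks[j]?.getD "" = "Z" ∨ (j + 1 < n ∧ toks[j + 1]?.getD "" = "Z") then 0
  else (PySem.Int.ofStr? (toks[j]?.getD "")).getD 0

lemma pvCell_stable (toks : List String) (m j : Nat) (hj : j < m)
    (h : j + 1 = m → toks[m]?.getD "" ≠ "Z") :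
    pvCell toks m j = pvCell toks (m + 1) j := by
  have hiff : (toks[j]?.getD "" = "Z" ∨ (j + 1 < m ∧ toks[j + 1]?.getD "" = "Z"))
      ↔ (toks[j]?.getD "" = "Z" ∨ (j + 1 < m + 1 ∧ toks[j + 1]?.getD "" = "Z")) := by
    constructor
    · rintro (h1 | ⟨h2, h3⟩)
      · exact Or.inl h1
      · exact Or.inr ⟨by omega, h3⟩
    · rintro (h1 | ⟨h2, h3⟩)
      · exact Or.inl h1
      · rcases Nat.lt_or_ge (j + 1) m with hlt | hge
        · exact Or.inr ⟨hlt, h3⟩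
        · have heq : j + 1 = m := by omega
          exact absurd (heq ▸ h3) (h heq)
  unfold pvCell
  simp only [hiff]

lemma pvA_fold (toks : List String) (m : Nat) (hm : m ≤ toks.length) :
    (PySem.List.pyRange 0 (m : Int) 1).foldl
      (fun ans i =>
        if PySem.List.pyGetD toks i "" = "Z" then
          PySem.List.pySetD (ans ++ [(0 : Int)]) (i - 1) 0
        else
          ans ++ [(PySem.Int.ofStr? (PySem.List.pyGetD toks i "")).getD 0]) []
    = (List.range m).map (pvCell toks m) := by
  induction m with
  | zero => simp [PySem.List.pyRange_one_eq_nil]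
  | succ m ih =>
    have hm' : m ≤ toks.length := by omega
    have hcast : ((m + 1 : Nat) : Int) = (m : Int) + 1 := by push_cast; ring
    rw [hcast, PySem.List.pyRange_one_succ_right (by positivity), List.foldl_append,
        ih hm', List.foldl_cons, List.foldl_nil]
    have hget : PySem.List.pyGetD toks (m : Int) "" = toks[m]?.getD "" := by
      rw [PySem.List.pyGetD_natCast, List.getD_eq_getElem?_getD]
    rw [hget]
    by_cases hz : toks[m]?.getD "" = "Z"
    · rw [if_pos hz]
      cases m with
      | zero =>
        simp [PySem.List.pySetD, PySem.List.pySet?, PySem.List.pyIdx?, pvCell, hz,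
          List.range_succ]
      | succ k =>
        have hsub : ((k + 1 : Nat) : Int) - 1 = (k : Int) := by push_cast; ring
        rw [hsub, PySem.List.pySetD_natCast]
        rw [List.range_succ (n := k + 1), List.map_append]
        rw [show ((List.range (k + 1)).map (pvCell toks (k + 1)) ++ [(0 : Int)]).set k 0
              = ((List.range (k + 1)).map (pvCell toks (k + 1))).set k 0 ++ [(0 : Int)] from by
          rw [List.set_append_left _ _ (by simp)]]
        congr 1
        · apply List.ext_getElem (by simp)
          intro j hj1 hj2
          simp only [List.getElem_set, List.getElem_map, List.getElem_range]
          have hj : j < k + 1 := by simpa using hj1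
          by_cases hjk : j = k
          · subst hjk
            simp [pvCell, hz]
          · simp only [if_neg (by omega : ¬ k = j)]
            exact pvCell_stable toks (k + 1) j hj (by intro h; omega)
        · simp [pvCell, hz]
    · rw [if_neg hz]
      rw [List.range_succ, List.map_append]
      congr 1
      · apply List.map_congr_left
        intro j hj
        have hj' : j < m := List.mem_range.mp hj
        exact pvCell_stable toks m j hj' (fun _ => hz)
      · simp [pvCell, hz]

lemma pvB_eq_sum (toks : List String) :
    (PySem.List.enumerate toks).foldl
      (fun total p =>
        if p.2 = "Z" then total
        else
          let v := (PySem.Int.ofStr? p.2).getD 0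
          if p.1 + 1 = (toks.length : Int) ∨ PySem.List.pyGetD toks (p.1 + 1) "" ≠ "Z" then total + v
          else total) 0
    = ((List.range toks.length).map (pvCell toks toks.length)).sum := by
  have hstep : (fun (total : Int) (p : Int × String) =>
        if p.2 = "Z" then total
        else
          let v := (PySem.Int.ofStr? p.2).getD 0
          if p.1 + 1 = (toks.length : Int) ∨ PySem.List.pyGetD toks (p.1 + 1) "" ≠ "Z" then total + v
          else total)
      = fun total p => total +
          (if p.2 = "Z" then 0
           else if p.1 + 1 = (toks.length : Int) ∨ PySem.List.pyGetD toks (p.1 + 1) "" ≠ "Z"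
             then (PySem.Int.ofStr? p.2).getD 0 else 0) := by
    funext t p
    by_cases h1 : p.2 = "Z" <;>
      by_cases h2 : p.1 + 1 = (toks.length : Int) ∨ PySem.List.pyGetD toks (p.1 + 1) "" ≠ "Z" <;>
      simp [h1, h2]
  rw [hstep, PySem.List.foldl_add, zero_add,
      PySem.List.enumerate_eq_map_pyRange toks "", List.map_map]
  have hlen : PySem.List.len toks = (toks.length : Int) := by simp [PySem.List.len]
  rw [hlen, PySem.List.pyRange_one 0 (toks.length : Int)]
  simp only [sub_zero, Int.toNat_natCast, List.map_map]
  apply congrArg List.sum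
  apply List.map_congr_left
  intro k hk
  have hk' : k < toks.length := List.mem_range.mp hk
  simp only [Function.comp]
  have hg0 : PySem.List.pyGetD toks ((0 : Int) + (k : Int)) "" = toks[k]?.getD "" := by
    rw [zero_add, PySem.List.pyGetD_natCast, List.getD_eq_getElem?_getD]
  have hg1 : PySem.List.pyGetD toks ((0 : Int) + (k : Int) + 1) "" = toks[k + 1]?.getD "" := by
    rw [show ((0 : Int) + (k : Int) + 1) = ((k + 1 : Nat) : Int) from by push_cast; ring,
        PySem.List.pyGetD_natCast, List.getD_eq_getElem?_getD]
  rw [hg0, hg1]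
  unfold pvCell
  by_cases hz : toks[k]?.getD "" = "Z"
  · simp [hz]
  · by_cases hlast : k + 1 = toks.length
    · have hle : (0 : Int) + (k : Int) + 1 = (toks.length : Int) := by omega
      have hd : toks[k + 1]?.getD "" = "" := by
        rw [hlast]; simp
      simp [hz, hd]
    · have hne : ¬ ((0 : Int) + (k : Int) + 1 = (toks.length : Int)) := by omega
      by_cases hzz : toks[k + 1]?.getD "" = "Z"
      · simp [hz, hzz]
        omega
      · simp [hz, hzz]

-- ===== VERDICT (by name: the statement is the Claim_ definition above) =====
theorem solution_spec : Claim_equal_solution := by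
  intro s _ _
  unfold Spec_solution
  simp only [solution, solution_alt]
  rw [pvA_fold (PySem.Str.split₀ s) (PySem.Str.split₀ s).length le_rfl, pvB_eq_sum]
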